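-- pv_equiv track=rewrite | github.com/nathan29849/TIL | 03_Python/Study/03_Python/Study/이진탐색/떡볶이떡만들기.py | solution
-- ===== SOURCE A (Python) =====
-- def solution(n, m, arr):
--     start = 0
--     end = max(arr)
--     pre_mid = 0                 # 이전에 설정한 절단기의 높이
--     while start < end:
--         ddeok = 0
--         mid = (start+end)//2    # 현재 설정한 절단기의 높이
--         for x in arr:
--             if (x - mid) >= 0:
--                 ddeok += (x-mid)
--
--         if ddeok >= m:          # 잘린 떡의 총합이 기준치(m)을 넘는다면,
--             start = mid + 1     # 시작점을 더 올려도 된다.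
--             if pre_mid < mid:   # 이 전에 설정한 절단기의 높이와 비교
--                 pre_mid = mid
--         else:                   # 잘린 떡의 총합이 기준치(m)을 넘지 못한다면,
--             end = mid - 1       # 끝점을 내려야 한다.(기준치를 맞추기 위해)
--     return pre_mid
-- ===== SOURCE B (Python) =====
-- def solution(n, m, arr):
--     # Sort once + prefix sums; each binary-search iteration computes the cut
--     # excess in O(log n) via a hand-written bisect instead of scanning arr.
--     s = sorted(arr)
--     end = s[-1]
--     ln = len(s)
--     pref = [0]
--     acc = 0
--     for x in s:
--         acc += x
--         pref.append(acc)
--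
--     def bisect_left(a, v):
--         lo, hi = 0, len(a)
--         while lo < hi:
--             mid = (lo + hi) // 2
--             if a[mid] < v:
--                 lo = mid + 1
--             else:
--                 hi = mid
--         return lo
--
--     start = 0
--     while start < end:
--         mid = (start + end) // 2
--         i = bisect_left(s, mid)
--         excess = (pref[ln] - pref[i]) - (ln - i) * mid
--         if excess >= m:
--             start = mid + 1
--         else:
--             end = mid - 1
--     return max(start - 1, 0)
-- ===== Notes on version B (the rewrite author's own statement) =====
-- stated objective: faster
-- what changed: B sorts the array once and builds prefix sums, so each binary-search iteration gets the total cut excess from a bisect lookup plus arithmetic instead of scanning the whole array, and B drops A's pre_mid bookkeeping by returning max(start-1, 0) directly.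
import Mathlib
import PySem

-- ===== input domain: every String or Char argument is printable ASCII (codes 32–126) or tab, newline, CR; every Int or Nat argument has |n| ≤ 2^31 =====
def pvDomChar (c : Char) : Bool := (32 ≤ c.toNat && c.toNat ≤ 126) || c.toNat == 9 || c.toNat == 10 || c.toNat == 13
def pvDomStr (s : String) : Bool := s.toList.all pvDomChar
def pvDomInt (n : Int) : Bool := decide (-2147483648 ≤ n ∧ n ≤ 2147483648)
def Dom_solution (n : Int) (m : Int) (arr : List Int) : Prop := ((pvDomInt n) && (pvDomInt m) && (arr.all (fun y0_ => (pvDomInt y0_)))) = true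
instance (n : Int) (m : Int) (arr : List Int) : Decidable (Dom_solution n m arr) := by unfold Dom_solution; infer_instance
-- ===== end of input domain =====

-- B sorts once + prefix sums + bisect so each binary-search step is O(log n) instead of O(n)
-- (objective: faster); Pre_ excludes arr = [], on which Python A raises ValueError (max of empty).


-- ===== PORT A =====
-- the 'while start < end' loop of A, state (start, e, pre_mid)
def solutionLoopA (arr : List Int) (m : Int) (start e pre : Int) : Int :=
  if h : start < e then
    let mid := PySem.Int.floordiv (start + e) 2
    let ddeok := arr.foldl (fun acc x => if x - mid ≥ 0 then acc + (x - mid) else acc) 0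
    if ddeok ≥ m then
      solutionLoopA arr m (mid + 1) e (if pre < mid then mid else pre)
    else
      solutionLoopA arr m start (mid - 1) pre
  else pre
termination_by (e - start).toNat
decreasing_by
  · have hb := PySem.Int.floordiv_two_mid_bounds (le_of_lt h) (lo := start) (hi := e)
    omega
  · have hb := PySem.Int.floordiv_two_mid_bounds (le_of_lt h) (lo := start) (hi := e)
    omega

def solution (n : Int) (m : Int) (arr : List Int) : Int :=
  match PySem.List.max? arr (fun x => x) with     -- end = max(arr)
  | some e => solutionLoopA arr m 0 e 0
  | none => 0                                     -- max([]) raises ValueError: outside Pre_solution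

-- ===== PORT B =====
-- pref = [0]; acc = 0; for x in s: acc += x; pref.append(acc)
def solutionPref (s : List Int) : List Int × Int :=
  s.foldl (fun st x => (st.1 ++ [st.2 + x], st.2 + x)) ([0], 0)

-- the 'while start < end' loop of Source B; Source B's hand-written bisect_left is exactly
-- bisect.bisect_left, ported as PySem.List.bisectLeft; pref[len(s)] and pref[i] are
-- in-range nonnegative indexes (0 ≤ i ≤ len(s) < len(pref)), so .getD is exact there.
def solutionLoopB (s pref : List Int) (m : Int) (start e : Int) : Int :=
  if h : start < e then
    let mid := PySem.Int.floordiv (start + e) 2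
    let i := PySem.List.bisectLeft s mid
    let excess := (pref.getD s.length 0 - pref.getD i 0) - ((s.length : Int) - (i : Int)) * mid
    if excess ≥ m then
      solutionLoopB s pref m (mid + 1) e
    else
      solutionLoopB s pref m start (mid - 1)
  else start
termination_by (e - start).toNat
decreasing_by
  · have hb := PySem.Int.floordiv_two_mid_bounds (le_of_lt h) (lo := start) (hi := e)
    omega
  · have hb := PySem.Int.floordiv_two_mid_bounds (le_of_lt h) (lo := start) (hi := e)
    omega

def solution_alt (n : Int) (m : Int) (arr : List Int) : Int :=
  let s := PySem.List.sorted arr (fun x => x)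
  match PySem.List.pyGet? s (-1) with             -- end = s[-1]; IndexError on []: outside Pre_solution
  | some e =>
    let pref := (solutionPref s).1
    max (solutionLoopB s pref m 0 e - 1) 0
  | none => 0

-- ===== PRECONDITION & SPEC =====
-- Pre_ excludes exactly the empty list, on which Python A raises ValueError (max of empty sequence).
def Pre_solution (n : Int) (m : Int) (arr : List Int) : Prop := arr ≠ []
instance (n : Int) (m : Int) (arr : List Int) : Decidable (Pre_solution n m arr) := by unfold Pre_solution; infer_instance
def pvWitness_solution : Int × Int × List Int := (4, 6, [19, 15, 10, 17])

def Spec_solution (n : Int) (m : Int) (arr : List Int) (out : Int) : Prop := out = solution_alt n m arr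
instance (n : Int) (m : Int) (arr : List Int) (out : Int) : Decidable (Spec_solution n m arr out) := by unfold Spec_solution; infer_instance

-- ===== CLAIM (what is proved, stated in full; the proofs are below) =====
def Claim_equal_solution : Prop := ∀ (n : Int) (m : Int) (arr : List Int), Dom_solution n m arr → Pre_solution n m arr → Spec_solution n m arr (solution n m arr)

-- ===== LEMMAS AND PROOFS =====

-- structure of the prefix-sum fold
theorem solutionPref_struct (s : List Int) (l0 : List Int) (a0 : Int) :
    s.foldl (fun st x => (st.1 ++ [st.2 + x], st.2 + x)) (l0, a0)
      = (l0 ++ (List.range s.length).map (fun j => a0 + (s.take (j+1)).sum), a0 + s.sum) := by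
  induction s generalizing l0 a0 with
  | nil => simp
  | cons x t ih =>
      simp only [List.foldl_cons, ih, List.length_cons, List.sum_cons,
        List.range_succ_eq_map, List.map_cons, List.map_map]
      simp [List.take_succ_cons, Function.comp_def, List.append_assoc, add_assoc]

theorem solutionPref_getD (s : List Int) (k : Nat) (hk : k ≤ s.length) :
    (solutionPref s).1.getD k 0 = (s.take k).sum := by
  unfold solutionPref
  rw [solutionPref_struct]
  cases k with
  | zero => simp
  | succ j =>
      have hj : j < s.length := by omega
      have hlen : j < ((List.range s.length).map (fun j => 0 + (s.take (j+1)).sum)).length := by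
        simpa using hj
      simp only [List.singleton_append, List.getD_cons_succ]
      rw [List.getD_eq_getElem _ _ hlen]
      simp

theorem sum_map_sub_const (l : List Int) (c : Int) :
    (l.map (fun x => x - c)).sum = l.sum - (l.length : Int) * c := by
  induction l with
  | nil => simp
  | cons x t ih => simp [ih]; ring

-- on the sorted list, the elements ≥ mid are exactly the suffix from bisectLeft
theorem filter_ge_eq_drop (s : List Int) (hs : List.Pairwise (· ≤ ·) s) (mid : Int) :
    s.filter (fun x => decide (x - mid ≥ 0)) = s.drop (PySem.List.bisectLeft s mid) := by
  obtain ⟨hle, hlt, hge⟩ := PySem.List.bisectLeft_spec s mid hs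
  set i := PySem.List.bisectLeft s mid with hi
  conv_lhs => rw [← List.take_append_drop i s]
  rw [List.filter_append]
  have h1 : (s.take i).filter (fun x => decide (x - mid ≥ 0)) = [] := by
    rw [List.filter_eq_nil_iff]
    intro x hx
    rw [List.mem_iff_getElem] at hx
    obtain ⟨j, hj, hxe⟩ := hx
    have hjl : j < i ∧ j < s.length := by simpa using hj
    have hlt' := hlt j hjl.2 hjl.1
    have : x = s[j]'hjl.2 := by rw [← hxe]; simp [List.getElem_take]
    simp [this]; omega
  have h2 : (s.drop i).filter (fun x => decide (x - mid ≥ 0)) = s.drop i := by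
    rw [List.filter_eq_self]
    intro x hx
    rw [List.mem_iff_getElem] at hx
    obtain ⟨j, hj, hxe⟩ := hx
    have hj' : i + j < s.length := by simp at hj; omega
    have hge' := hge (i + j) hj' (by omega)
    have : x = s[i + j] := by rw [← hxe]; simp [List.getElem_drop]
    simp [this]; omega
  rw [h1, h2, List.nil_append]

-- A's inner scan equals B's prefix-sum/bisect formula
theorem excess_eq (arr : List Int) (mid : Int) :
    arr.foldl (fun acc x => if x - mid ≥ 0 then acc + (x - mid) else acc) 0
      = ((solutionPref (PySem.List.sorted arr (fun x => x))).1.getD (PySem.List.sorted arr (fun x => x)).length 0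
          - (solutionPref (PySem.List.sorted arr (fun x => x))).1.getD (PySem.List.bisectLeft (PySem.List.sorted arr (fun x => x)) mid) 0)
        - (((PySem.List.sorted arr (fun x => x)).length : Int) - (PySem.List.bisectLeft (PySem.List.sorted arr (fun x => x)) mid : Int)) * mid := by
  set s := PySem.List.sorted arr (fun x => x) with hsdef
  have hperm : s.Perm arr := PySem.List.sorted_perm arr (fun x => x) false
  have hpw : List.Pairwise (· ≤ ·) s := by
    simpa using PySem.List.sorted_pairwise (κ := Int) arr (fun x => x)
  obtain ⟨hle, _, _⟩ := PySem.List.bisectLeft_spec s mid hpw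
  set i := PySem.List.bisectLeft s mid with hi
  -- left side: fold = sum over the filtered list
  rw [PySem.List.foldl_ite_eq_foldl_filter, PySem.List.foldl_add]
  simp only [zero_add]
  have hfperm : (arr.filter (fun x => decide (x - mid ≥ 0))).Perm
      (s.filter (fun x => decide (x - mid ≥ 0))) := (hperm.filter _).symm
  rw [List.Perm.sum_eq (hfperm.map _), filter_ge_eq_drop s hpw mid, ← hi]
  rw [sum_map_sub_const]
  -- right side: prefix sums
  rw [solutionPref_getD s s.length (le_refl _), solutionPref_getD s i hle]
  rw [List.take_length]
  have hsplit : (s.take i).sum + (s.drop i).sum = s.sum := by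
    rw [← List.sum_append, List.take_append_drop]
  have hlen : ((s.drop i).length : Int) = (s.length : Int) - (i : Int) := by
    simp; omega
  rw [hlen]
  omega

-- the two loops agree, given A's pre_mid invariant pre = max (start-1) 0
theorem loop_eq (arr : List Int) (m : Int) :
    ∀ (k : Nat) (start e pre : Int), (e - start).toNat = k → 0 ≤ start → pre = max (start - 1) 0 →
      solutionLoopA arr m start e pre
        = max (solutionLoopB (PySem.List.sorted arr (fun x => x)) (solutionPref (PySem.List.sorted arr (fun x => x))).1 m start e - 1) 0 := by
  intro k
  induction k using Nat.strong_induction_on with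
  | _ k ih =>
    intro start e pre hk h0 hpre
    rw [solutionLoopA, solutionLoopB]
    by_cases h : start < e
    · simp only [dif_pos h]
      have hb := PySem.Int.floordiv_two_mid_bounds (le_of_lt h) (lo := start) (hi := e)
      set mid := PySem.Int.floordiv (start + e) 2 with hmid
      rw [excess_eq arr mid]
      by_cases hc : ((solutionPref (PySem.List.sorted arr (fun x => x))).1.getD (PySem.List.sorted arr (fun x => x)).length 0
          - (solutionPref (PySem.List.sorted arr (fun x => x))).1.getD (PySem.List.bisectLeft (PySem.List.sorted arr (fun x => x)) mid) 0)
        - (((PySem.List.sorted arr (fun x => x)).length : Int) - (PySem.List.bisectLeft (PySem.List.sorted arr (fun x => x)) mid : Int)) * mid ≥ m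
      · simp only [if_pos hc]
        exact ih (e - (mid + 1)).toNat (by omega) (mid + 1) e _ rfl (by omega) (by omega)
      · simp only [if_neg hc]
        exact ih (mid - 1 - start).toNat (by omega) start (mid - 1) pre rfl h0 hpre
    · simp only [dif_neg h]
      omega

-- max(arr) is the last element of the sorted list
theorem max_eq_last (arr : List Int) (M e : Int)
    (hM : PySem.List.max? arr (fun x => x) = some M)
    (he : PySem.List.pyGet? (PySem.List.sorted arr (fun x => x)) (-1) = some e) :
    M = e := by
  set s := PySem.List.sorted arr (fun x => x) with hsdef
  have hperm : s.Perm arr := PySem.List.sorted_perm arr (fun x => x) false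
  have hpw : List.Pairwise (· ≤ ·) s := by
    simpa using PySem.List.sorted_pairwise (κ := Int) arr (fun x => x)
  have hMmem : M ∈ arr := PySem.List.max?_mem hM
  have hMmax : ∀ y ∈ arr, y ≤ M := by
    intro y hy; exact PySem.List.max?_isMax hM y hy
  have hne : s ≠ [] := by
    intro hnil
    rw [hnil] at hperm
    rw [List.nil_perm] at hperm
    rw [hperm] at hMmem
    simp at hMmem
  have hlen : 0 < s.length := List.length_pos_iff.mpr hne
  -- pyGet? s (-1) = last element
  have hgl : s[s.length - 1]? = some e := by
    simp only [PySem.List.pyGet?, PySem.List.pyIdx?] at he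
    rw [if_neg (by omega), if_pos (by omega)] at he
    simpa using he
  rw [List.getElem?_eq_some_iff] at hgl
  obtain ⟨hl1, he'⟩ := hgl
  have hemem : e ∈ s := by rw [← he']; exact List.getElem_mem _
  have h1 : e ≤ M := hMmax e (hperm.mem_iff.mp hemem)
  have hMs : M ∈ s := hperm.mem_iff.mpr hMmem
  rw [List.mem_iff_getElem] at hMs
  obtain ⟨j, hj, hMe⟩ := hMs
  have h2 : M ≤ e := by
    rw [← he', ← hMe]
    exact PySem.List.sorted_id_getElem_mono arr (by omega) hl1
  exact le_antisymm h2 h1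

-- ===== VERDICT (by name: the statement is the Claim_ definition above) =====
theorem solution_spec : Claim_equal_solution := by
  intro n m arr hdom hpre
  unfold Spec_solution solution solution_alt
  cases hM : PySem.List.max? arr (fun x => x) with
  | none => exact absurd ((PySem.List.max?_eq_none_iff _ _).mp hM) hpre
  | some M =>
    have hne : PySem.List.sorted arr (fun x => x) ≠ [] := by
      rw [ne_eq, PySem.List.sorted_eq_nil_iff]; exact hpre
    have hlen : 0 < (PySem.List.sorted arr (fun x => x)).length := List.length_pos_iff.mpr hne
    cases he : PySem.List.pyGet? (PySem.List.sorted arr (fun x => x)) (-1) with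
    | none =>
      exfalso
      simp only [PySem.List.pyGet?, PySem.List.pyIdx?] at he
      rw [if_neg (by omega), if_pos (by omega)] at he
      simp only [Option.bind_some] at he
      norm_num at he
      exact hpre he
    | some e =>
      simp only [he]
      rw [max_eq_last arr M e hM he]
      exact loop_eq arr m (e - 0).toNat 0 e 0 rfl (by omega) (by omega)
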